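-- pv_equiv track=rewrite | github.com/Kn4ughty/SEASS1 | test.py | get_humancrytext
-- ===== SOURCE A (Python) =====
-- def get_humancrytext(totalScore) -> str:
--     thresholds = {
--         -367397771: "You are offically worse than my dad",
--         -300000000: "Impressively bad",
--         -200000000: "Woah thats really really bad :(",
--         -100000000: "mmm strawberry jammm nummies",
--         -50000: "every single bone is shattered",
--         0: "Not every single bone is shattered!",
--         1500000: "Woah you might make it home",
--         2000000: "The landing legs were not crushed!",
--         2500000: "Actually decent!",
--         2700000: "You did a great job!",
--         2800000: "Very well done comrade",
--         2890000: "Perfect landing!!!!",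
--         2950000: "I didnt even think this was possible",
--         2992621: "I think I can say you have won the game."
--     }
--
--     if totalScore > 0:
--         for threshold, message in sorted(thresholds.items(), reverse=True):
--             if totalScore > threshold:
--                 return message
--     else:
--         for threshold, message in sorted(thresholds.items(), reverse=False):
--             if totalScore < threshold:
--                 return message
--
--
--     return "im confused"
-- ===== SOURCE B (Python) =====
-- # B: binary search into prebuilt parallel sorted threshold/message lists,
-- # instead of A's linear scan over a sorted dict.
--
-- _THRESHOLDS = [-367397771, -300000000, -200000000, -100000000, -50000, 0,
--                1500000, 2000000, 2500000, 2700000, 2800000, 2890000,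
--                2950000, 2992621]
-- _MESSAGES = ["You are offically worse than my dad",
--              "Impressively bad",
--              "Woah thats really really bad :(",
--              "mmm strawberry jammm nummies",
--              "every single bone is shattered",
--              "Not every single bone is shattered!",
--              "Woah you might make it home",
--              "The landing legs were not crushed!",
--              "Actually decent!",
--              "You did a great job!",
--              "Very well done comrade",
--              "Perfect landing!!!!",
--              "I didnt even think this was possible",
--              "I think I can say you have won the game."]
--
--
-- def _lower_bound(x, strict):
--     # first index i with _THRESHOLDS[i] >= x (strict=False) or > x (strict=True)
--     lo, hi = 0, len(_THRESHOLDS)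
--     while lo < hi:
--         mid = (lo + hi) // 2
--         t = _THRESHOLDS[mid]
--         if t < x or (strict and t == x):
--             lo = mid + 1
--         else:
--             hi = mid
--     return lo
--
--
-- def get_humancrytext(totalScore) -> str:
--     if totalScore > 0:
--         # message of the largest threshold strictly below totalScore
--         return _MESSAGES[_lower_bound(totalScore, False) - 1]
--     else:
--         # message of the smallest threshold strictly above totalScore
--         return _MESSAGES[_lower_bound(totalScore, True)]
-- ===== Notes on version B (the rewrite author's own statement) =====
-- stated objective: alternative
-- what changed: Replaces A's linear scans over a reverse/forward-sorted dict with a hand-written binary search (bisect_left / bisect_right style) into prebuilt parallel sorted threshold and message lists, keeping the same strict-comparison split on the sign of the score.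
import Mathlib
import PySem

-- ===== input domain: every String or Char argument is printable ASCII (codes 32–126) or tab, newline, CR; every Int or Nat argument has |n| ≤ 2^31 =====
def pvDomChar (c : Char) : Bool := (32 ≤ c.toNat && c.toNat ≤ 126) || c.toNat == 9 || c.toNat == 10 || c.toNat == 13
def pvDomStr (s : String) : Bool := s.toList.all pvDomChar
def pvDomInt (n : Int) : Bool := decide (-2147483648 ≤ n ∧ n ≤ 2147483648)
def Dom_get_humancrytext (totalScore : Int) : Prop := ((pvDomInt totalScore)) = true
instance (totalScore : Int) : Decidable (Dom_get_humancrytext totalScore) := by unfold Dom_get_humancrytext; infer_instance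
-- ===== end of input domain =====

-- B replaces A's linear scans over a sorted dict by a hand-written binary search into
-- prebuilt parallel sorted threshold/message lists (objective: alternative).

-- ===== PORT A =====
-- the dict literal, in insertion order
def pvThresholds : PySem.Dict Int String := PySem.Dict.ofList
  [((-367397771), "You are offically worse than my dad"),
       ((-300000000), "Impressively bad"),
       ((-200000000), "Woah thats really really bad :("),
       ((-100000000), "mmm strawberry jammm nummies"),
       ((-50000), "every single bone is shattered"),
       (0, "Not every single bone is shattered!"),
       (1500000, "Woah you might make it home"),
       (2000000, "The landing legs were not crushed!"),
       (2500000, "Actually decent!"),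
       (2700000, "You did a great job!"),
       (2800000, "Very well done comrade"),
       (2890000, "Perfect landing!!!!"),
       (2950000, "I didnt even think this was possible"),
       (2992621, "I think I can say you have won the game.")]

-- the two for-loops with an early `return`: first pair passing the test, else fall through
def pvScanGT (t : Int) : List (Int × String) → Option String
  | [] => none
  | (thr, msg) :: rest => if t > thr then some msg else pvScanGT t rest

def pvScanLT (t : Int) : List (Int × String) → Option String
  | [] => none
  | (thr, msg) :: rest => if t < thr then some msg else pvScanLT t rest

-- Python sorts the (int, str) tuples lexicographically; the dict's keys are distinct,
-- so sorting by the key alone is exact here.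
def get_humancrytext (totalScore : Int) : String :=
  match (if totalScore > 0 then
           pvScanGT totalScore (PySem.List.sorted pvThresholds.items (fun p => p.1) true)
         else
           pvScanLT totalScore (PySem.List.sorted pvThresholds.items (fun p => p.1) false)) with
  | some m => m
  | none => "im confused"

-- ===== PORT B =====
def pvAltThresholds : List Int :=
  [(-367397771), (-300000000), (-200000000), (-100000000), (-50000), 0, 1500000, 2000000, 2500000, 2700000, 2800000, 2890000, 2950000, 2992621]

def pvAltMessages : List String :=
  ["You are offically worse than my dad", "Impressively bad", "Woah thats really really bad :(", "mmm strawberry jammm nummies", "every single bone is shattered", "Not every single bone is shattered!", "Woah you might make it home", "The landing legs were not crushed!", "Actually decent!", "You did a great job!", "Very well done comrade", "Perfect landing!!!!", "I didnt even think this was possible", "I think I can say you have won the game."]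

-- the `while lo < hi` loop of _lower_bound, with fuel ≥ hi - lo (14 = initial hi - lo
-- suffices; each step shrinks hi - lo); lo, hi are nonnegative Python ints, so Nat with
-- Nat division by 2 is exact, and mid < hi ≤ 14 is always in range, so `getD mid 0`
-- is exactly _THRESHOLDS[mid]
def pvLoop (x : Int) (strict : Bool) : Nat → Nat → Nat → Nat
  | 0, lo, _ => lo
  | fuel + 1, lo, hi =>
    if lo < hi then
      let mid := (lo + hi) / 2
      let t := pvAltThresholds.getD mid 0
      if t < x ∨ (strict = true ∧ t = x) then pvLoop x strict fuel (mid + 1) hi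
      else pvLoop x strict fuel lo mid
    else lo

def pvLowerBound (x : Int) (strict : Bool) : Nat :=
  pvLoop x strict 14 0 pvAltThresholds.length

def get_humancrytext_alt (totalScore : Int) : String :=
  if totalScore > 0 then
    PySem.List.pyGetD pvAltMessages ((pvLowerBound totalScore false : Int) - 1) ""
  else
    PySem.List.pyGetD pvAltMessages ((pvLowerBound totalScore true : Int)) ""

-- ===== PRECONDITION & SPEC =====
def Spec_get_humancrytext (totalScore : Int) (out : String) : Prop := out = get_humancrytext_alt totalScore
instance (totalScore : Int) (out : String) : Decidable (Spec_get_humancrytext totalScore out) := by unfold Spec_get_humancrytext; infer_instance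

-- ===== CLAIM (what is proved, stated in full; the proofs are below) =====
def Claim_equal_get_humancrytext : Prop := ∀ (totalScore : Int), Dom_get_humancrytext totalScore → Spec_get_humancrytext totalScore (get_humancrytext totalScore)

-- ===== LEMMAS AND PROOFS =====

-- the dict's items sorted by key, ascending and descending, as literal lists
theorem pv_sorted_asc :
    PySem.List.sorted pvThresholds.items (fun p => p.1) false =
      [((-367397771), "You are offically worse than my dad"),
       ((-300000000), "Impressively bad"),
       ((-200000000), "Woah thats really really bad :("),
       ((-100000000), "mmm strawberry jammm nummies"),
       ((-50000), "every single bone is shattered"),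
       (0, "Not every single bone is shattered!"),
       (1500000, "Woah you might make it home"),
       (2000000, "The landing legs were not crushed!"),
       (2500000, "Actually decent!"),
       (2700000, "You did a great job!"),
       (2800000, "Very well done comrade"),
       (2890000, "Perfect landing!!!!"),
       (2950000, "I didnt even think this was possible"),
       (2992621, "I think I can say you have won the game.")] := by
  decide

theorem pv_sorted_desc :
    PySem.List.sorted pvThresholds.items (fun p => p.1) true =
      [(2992621, "I think I can say you have won the game."),
       (2950000, "I didnt even think this was possible"),
       (2890000, "Perfect landing!!!!"),
       (2800000, "Very well done comrade"),
       (2700000, "You did a great job!"),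
       (2500000, "Actually decent!"),
       (2000000, "The landing legs were not crushed!"),
       (1500000, "Woah you might make it home"),
       (0, "Not every single bone is shattered!"),
       ((-50000), "every single bone is shattered"),
       ((-100000000), "mmm strawberry jammm nummies"),
       ((-200000000), "Woah thats really really bad :("),
       ((-300000000), "Impressively bad"),
       ((-367397771), "You are offically worse than my dad")] := by
  decide

-- "the scan condition holds exactly on the index prefix below n"
def pvCond (x : Int) (strict : Bool) (i : Nat) : Prop :=
  pvAltThresholds.getD i 0 < x ∨ (strict = true ∧ pvAltThresholds.getD i 0 = x)

-- binary-search invariant: if pvCond holds exactly on indices < n, the loop converges to n clipped to [lo, hi]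
theorem pvLoop_spec (x : Int) (strict : Bool) (n : Nat) (hn : n ≤ 14)
    (H : ∀ i, i < 14 → (pvCond x strict i ↔ i < n)) :
    ∀ fuel lo hi, hi ≤ 14 → hi - lo ≤ fuel → lo ≤ hi →
      pvLoop x strict fuel lo hi = max lo (min hi n) := by
  intro fuel
  induction fuel with
  | zero => intro lo hi h14 hf hlh; simp only [pvLoop]; omega
  | succ fuel ih =>
    intro lo hi h14 hf hlh
    simp only [pvLoop]
    by_cases hlt : lo < hi
    · rw [if_pos hlt]
      have hmid : (lo + hi) / 2 < hi := by omega
      have hmid2 : lo ≤ (lo + hi) / 2 := by omega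
      by_cases hc : pvAltThresholds.getD ((lo + hi) / 2) 0 < x ∨
          (strict = true ∧ pvAltThresholds.getD ((lo + hi) / 2) 0 = x)
      · rw [if_pos hc, ih ((lo+hi)/2 + 1) hi h14 (by omega) (by omega)]
        have := (H _ (by omega)).mp hc
        omega
      · rw [if_neg hc, ih lo ((lo+hi)/2) (by omega) (by omega) (by omega)]
        have : ¬ ((lo+hi)/2 < n) := fun h => hc ((H _ (by omega)).mpr h)
        omega
    · rw [if_neg hlt]; omega

theorem pvLB_eq (x : Int) (strict : Bool) (n : Nat) (hn : n ≤ 14)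
    (H : ∀ i, i < 14 → (pvCond x strict i ↔ i < n)) :
    pvLowerBound x strict = n := by
  unfold pvLowerBound
  rw [show pvAltThresholds.length = 14 from rfl,
      pvLoop_spec x strict n hn H 14 0 14 (by omega) (by omega) (by omega)]
  omega

-- the thresholds list, element by element
theorem pvG0 : pvAltThresholds.getD 0 0 = (-367397771 : Int) := rfl
theorem pvG1 : pvAltThresholds.getD 1 0 = (-300000000 : Int) := rfl
theorem pvG2 : pvAltThresholds.getD 2 0 = (-200000000 : Int) := rfl
theorem pvG3 : pvAltThresholds.getD 3 0 = (-100000000 : Int) := rfl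
theorem pvG4 : pvAltThresholds.getD 4 0 = (-50000 : Int) := rfl
theorem pvG5 : pvAltThresholds.getD 5 0 = 0 := rfl
theorem pvG6 : pvAltThresholds.getD 6 0 = 1500000 := rfl
theorem pvG7 : pvAltThresholds.getD 7 0 = 2000000 := rfl
theorem pvG8 : pvAltThresholds.getD 8 0 = 2500000 := rfl
theorem pvG9 : pvAltThresholds.getD 9 0 = 2700000 := rfl
theorem pvG10 : pvAltThresholds.getD 10 0 = 2800000 := rfl
theorem pvG11 : pvAltThresholds.getD 11 0 = 2890000 := rfl
theorem pvG12 : pvAltThresholds.getD 12 0 = 2950000 := rfl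
theorem pvG13 : pvAltThresholds.getD 13 0 = 2992621 := rfl

-- closed form of the binary search, positive branch (strict = false)
set_option maxHeartbeats 2000000 in
theorem pv_lb_false (t : Int) :
    pvLowerBound t false = if t ≤ (-367397771 : Int) then 0 else if t ≤ (-300000000 : Int) then 1 else if t ≤ (-200000000 : Int) then 2 else if t ≤ (-100000000 : Int) then 3 else if t ≤ (-50000 : Int) then 4 else if t ≤ 0 then 5 else if t ≤ 1500000 then 6 else if t ≤ 2000000 then 7 else if t ≤ 2500000 then 8 else if t ≤ 2700000 then 9 else if t ≤ 2800000 then 10 else if t ≤ 2890000 then 11 else if t ≤ 2950000 then 12 else if t ≤ 2992621 then 13 else 14 := by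
  by_cases h0 : t ≤ (-367397771 : Int)
  · rw [if_pos h0]
    exact pvLB_eq _ _ 0 (by omega)
      (by intro i hi; interval_cases i <;> simp only [pvCond, pvG0, pvG1, pvG2, pvG3, pvG4, pvG5, pvG6, pvG7, pvG8, pvG9, pvG10, pvG11, pvG12, pvG13, Bool.false_eq_true, false_and, or_false] <;> omega)
  rw [if_neg h0]
  by_cases h1 : t ≤ (-300000000 : Int)
  · rw [if_pos h1]
    exact pvLB_eq _ _ 1 (by omega)
      (by intro i hi; interval_cases i <;> simp only [pvCond, pvG0, pvG1, pvG2, pvG3, pvG4, pvG5, pvG6, pvG7, pvG8, pvG9, pvG10, pvG11, pvG12, pvG13, Bool.false_eq_true, false_and, or_false] <;> omega)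
  rw [if_neg h1]
  by_cases h2 : t ≤ (-200000000 : Int)
  · rw [if_pos h2]
    exact pvLB_eq _ _ 2 (by omega)
      (by intro i hi; interval_cases i <;> simp only [pvCond, pvG0, pvG1, pvG2, pvG3, pvG4, pvG5, pvG6, pvG7, pvG8, pvG9, pvG10, pvG11, pvG12, pvG13, Bool.false_eq_true, false_and, or_false] <;> omega)
  rw [if_neg h2]
  by_cases h3 : t ≤ (-100000000 : Int)
  · rw [if_pos h3]
    exact pvLB_eq _ _ 3 (by omega)
      (by intro i hi; interval_cases i <;> simp only [pvCond, pvG0, pvG1, pvG2, pvG3, pvG4, pvG5, pvG6, pvG7, pvG8, pvG9, pvG10, pvG11, pvG12, pvG13, Bool.false_eq_true, false_and, or_false] <;> omega)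
  rw [if_neg h3]
  by_cases h4 : t ≤ (-50000 : Int)
  · rw [if_pos h4]
    exact pvLB_eq _ _ 4 (by omega)
      (by intro i hi; interval_cases i <;> simp only [pvCond, pvG0, pvG1, pvG2, pvG3, pvG4, pvG5, pvG6, pvG7, pvG8, pvG9, pvG10, pvG11, pvG12, pvG13, Bool.false_eq_true, false_and, or_false] <;> omega)
  rw [if_neg h4]
  by_cases h5 : t ≤ 0
  · rw [if_pos h5]
    exact pvLB_eq _ _ 5 (by omega)
      (by intro i hi; interval_cases i <;> simp only [pvCond, pvG0, pvG1, pvG2, pvG3, pvG4, pvG5, pvG6, pvG7, pvG8, pvG9, pvG10, pvG11, pvG12, pvG13, Bool.false_eq_true, false_and, or_false] <;> omega)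
  rw [if_neg h5]
  by_cases h6 : t ≤ 1500000
  · rw [if_pos h6]
    exact pvLB_eq _ _ 6 (by omega)
      (by intro i hi; interval_cases i <;> simp only [pvCond, pvG0, pvG1, pvG2, pvG3, pvG4, pvG5, pvG6, pvG7, pvG8, pvG9, pvG10, pvG11, pvG12, pvG13, Bool.false_eq_true, false_and, or_false] <;> omega)
  rw [if_neg h6]
  by_cases h7 : t ≤ 2000000
  · rw [if_pos h7]
    exact pvLB_eq _ _ 7 (by omega)
      (by intro i hi; interval_cases i <;> simp only [pvCond, pvG0, pvG1, pvG2, pvG3, pvG4, pvG5, pvG6, pvG7, pvG8, pvG9, pvG10, pvG11, pvG12, pvG13, Bool.false_eq_true, false_and, or_false] <;> omega)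
  rw [if_neg h7]
  by_cases h8 : t ≤ 2500000
  · rw [if_pos h8]
    exact pvLB_eq _ _ 8 (by omega)
      (by intro i hi; interval_cases i <;> simp only [pvCond, pvG0, pvG1, pvG2, pvG3, pvG4, pvG5, pvG6, pvG7, pvG8, pvG9, pvG10, pvG11, pvG12, pvG13, Bool.false_eq_true, false_and, or_false] <;> omega)
  rw [if_neg h8]
  by_cases h9 : t ≤ 2700000
  · rw [if_pos h9]
    exact pvLB_eq _ _ 9 (by omega)
      (by intro i hi; interval_cases i <;> simp only [pvCond, pvG0, pvG1, pvG2, pvG3, pvG4, pvG5, pvG6, pvG7, pvG8, pvG9, pvG10, pvG11, pvG12, pvG13, Bool.false_eq_true, false_and, or_false] <;> omega)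
  rw [if_neg h9]
  by_cases h10 : t ≤ 2800000
  · rw [if_pos h10]
    exact pvLB_eq _ _ 10 (by omega)
      (by intro i hi; interval_cases i <;> simp only [pvCond, pvG0, pvG1, pvG2, pvG3, pvG4, pvG5, pvG6, pvG7, pvG8, pvG9, pvG10, pvG11, pvG12, pvG13, Bool.false_eq_true, false_and, or_false] <;> omega)
  rw [if_neg h10]
  by_cases h11 : t ≤ 2890000
  · rw [if_pos h11]
    exact pvLB_eq _ _ 11 (by omega)
      (by intro i hi; interval_cases i <;> simp only [pvCond, pvG0, pvG1, pvG2, pvG3, pvG4, pvG5, pvG6, pvG7, pvG8, pvG9, pvG10, pvG11, pvG12, pvG13, Bool.false_eq_true, false_and, or_false] <;> omega)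
  rw [if_neg h11]
  by_cases h12 : t ≤ 2950000
  · rw [if_pos h12]
    exact pvLB_eq _ _ 12 (by omega)
      (by intro i hi; interval_cases i <;> simp only [pvCond, pvG0, pvG1, pvG2, pvG3, pvG4, pvG5, pvG6, pvG7, pvG8, pvG9, pvG10, pvG11, pvG12, pvG13, Bool.false_eq_true, false_and, or_false] <;> omega)
  rw [if_neg h12]
  by_cases h13 : t ≤ 2992621
  · rw [if_pos h13]
    exact pvLB_eq _ _ 13 (by omega)
      (by intro i hi; interval_cases i <;> simp only [pvCond, pvG0, pvG1, pvG2, pvG3, pvG4, pvG5, pvG6, pvG7, pvG8, pvG9, pvG10, pvG11, pvG12, pvG13, Bool.false_eq_true, false_and, or_false] <;> omega)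
  rw [if_neg h13]
  exact pvLB_eq _ _ 14 (by omega)
    (by intro i hi; interval_cases i <;> simp only [pvCond, pvG0, pvG1, pvG2, pvG3, pvG4, pvG5, pvG6, pvG7, pvG8, pvG9, pvG10, pvG11, pvG12, pvG13, Bool.false_eq_true, false_and, or_false] <;> omega)

-- closed form of the binary search, non-positive branch (strict = true)
set_option maxHeartbeats 2000000 in
theorem pv_lb_true (t : Int) :
    pvLowerBound t true = if t < (-367397771 : Int) then 0 else if t < (-300000000 : Int) then 1 else if t < (-200000000 : Int) then 2 else if t < (-100000000 : Int) then 3 else if t < (-50000 : Int) then 4 else if t < 0 then 5 else if t < 1500000 then 6 else if t < 2000000 then 7 else if t < 2500000 then 8 else if t < 2700000 then 9 else if t < 2800000 then 10 else if t < 2890000 then 11 else if t < 2950000 then 12 else if t < 2992621 then 13 else 14 := by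
  by_cases h0 : t < (-367397771 : Int)
  · rw [if_pos h0]
    exact pvLB_eq _ _ 0 (by omega)
      (by intro i hi; interval_cases i <;> simp only [pvCond, pvG0, pvG1, pvG2, pvG3, pvG4, pvG5, pvG6, pvG7, pvG8, pvG9, pvG10, pvG11, pvG12, pvG13, true_and] <;> omega)
  rw [if_neg h0]
  by_cases h1 : t < (-300000000 : Int)
  · rw [if_pos h1]
    exact pvLB_eq _ _ 1 (by omega)
      (by intro i hi; interval_cases i <;> simp only [pvCond, pvG0, pvG1, pvG2, pvG3, pvG4, pvG5, pvG6, pvG7, pvG8, pvG9, pvG10, pvG11, pvG12, pvG13, true_and] <;> omega)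
  rw [if_neg h1]
  by_cases h2 : t < (-200000000 : Int)
  · rw [if_pos h2]
    exact pvLB_eq _ _ 2 (by omega)
      (by intro i hi; interval_cases i <;> simp only [pvCond, pvG0, pvG1, pvG2, pvG3, pvG4, pvG5, pvG6, pvG7, pvG8, pvG9, pvG10, pvG11, pvG12, pvG13, true_and] <;> omega)
  rw [if_neg h2]
  by_cases h3 : t < (-100000000 : Int)
  · rw [if_pos h3]
    exact pvLB_eq _ _ 3 (by omega)
      (by intro i hi; interval_cases i <;> simp only [pvCond, pvG0, pvG1, pvG2, pvG3, pvG4, pvG5, pvG6, pvG7, pvG8, pvG9, pvG10, pvG11, pvG12, pvG13, true_and] <;> omega)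
  rw [if_neg h3]
  by_cases h4 : t < (-50000 : Int)
  · rw [if_pos h4]
    exact pvLB_eq _ _ 4 (by omega)
      (by intro i hi; interval_cases i <;> simp only [pvCond, pvG0, pvG1, pvG2, pvG3, pvG4, pvG5, pvG6, pvG7, pvG8, pvG9, pvG10, pvG11, pvG12, pvG13, true_and] <;> omega)
  rw [if_neg h4]
  by_cases h5 : t < 0
  · rw [if_pos h5]
    exact pvLB_eq _ _ 5 (by omega)
      (by intro i hi; interval_cases i <;> simp only [pvCond, pvG0, pvG1, pvG2, pvG3, pvG4, pvG5, pvG6, pvG7, pvG8, pvG9, pvG10, pvG11, pvG12, pvG13, true_and] <;> omega)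
  rw [if_neg h5]
  by_cases h6 : t < 1500000
  · rw [if_pos h6]
    exact pvLB_eq _ _ 6 (by omega)
      (by intro i hi; interval_cases i <;> simp only [pvCond, pvG0, pvG1, pvG2, pvG3, pvG4, pvG5, pvG6, pvG7, pvG8, pvG9, pvG10, pvG11, pvG12, pvG13, true_and] <;> omega)
  rw [if_neg h6]
  by_cases h7 : t < 2000000
  · rw [if_pos h7]
    exact pvLB_eq _ _ 7 (by omega)
      (by intro i hi; interval_cases i <;> simp only [pvCond, pvG0, pvG1, pvG2, pvG3, pvG4, pvG5, pvG6, pvG7, pvG8, pvG9, pvG10, pvG11, pvG12, pvG13, true_and] <;> omega)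
  rw [if_neg h7]
  by_cases h8 : t < 2500000
  · rw [if_pos h8]
    exact pvLB_eq _ _ 8 (by omega)
      (by intro i hi; interval_cases i <;> simp only [pvCond, pvG0, pvG1, pvG2, pvG3, pvG4, pvG5, pvG6, pvG7, pvG8, pvG9, pvG10, pvG11, pvG12, pvG13, true_and] <;> omega)
  rw [if_neg h8]
  by_cases h9 : t < 2700000
  · rw [if_pos h9]
    exact pvLB_eq _ _ 9 (by omega)
      (by intro i hi; interval_cases i <;> simp only [pvCond, pvG0, pvG1, pvG2, pvG3, pvG4, pvG5, pvG6, pvG7, pvG8, pvG9, pvG10, pvG11, pvG12, pvG13, true_and] <;> omega)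
  rw [if_neg h9]
  by_cases h10 : t < 2800000
  · rw [if_pos h10]
    exact pvLB_eq _ _ 10 (by omega)
      (by intro i hi; interval_cases i <;> simp only [pvCond, pvG0, pvG1, pvG2, pvG3, pvG4, pvG5, pvG6, pvG7, pvG8, pvG9, pvG10, pvG11, pvG12, pvG13, true_and] <;> omega)
  rw [if_neg h10]
  by_cases h11 : t < 2890000
  · rw [if_pos h11]
    exact pvLB_eq _ _ 11 (by omega)
      (by intro i hi; interval_cases i <;> simp only [pvCond, pvG0, pvG1, pvG2, pvG3, pvG4, pvG5, pvG6, pvG7, pvG8, pvG9, pvG10, pvG11, pvG12, pvG13, true_and] <;> omega)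
  rw [if_neg h11]
  by_cases h12 : t < 2950000
  · rw [if_pos h12]
    exact pvLB_eq _ _ 12 (by omega)
      (by intro i hi; interval_cases i <;> simp only [pvCond, pvG0, pvG1, pvG2, pvG3, pvG4, pvG5, pvG6, pvG7, pvG8, pvG9, pvG10, pvG11, pvG12, pvG13, true_and] <;> omega)
  rw [if_neg h12]
  by_cases h13 : t < 2992621
  · rw [if_pos h13]
    exact pvLB_eq _ _ 13 (by omega)
      (by intro i hi; interval_cases i <;> simp only [pvCond, pvG0, pvG1, pvG2, pvG3, pvG4, pvG5, pvG6, pvG7, pvG8, pvG9, pvG10, pvG11, pvG12, pvG13, true_and] <;> omega)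
  rw [if_neg h13]
  exact pvLB_eq _ _ 14 (by omega)
    (by intro i hi; interval_cases i <;> simp only [pvCond, pvG0, pvG1, pvG2, pvG3, pvG4, pvG5, pvG6, pvG7, pvG8, pvG9, pvG10, pvG11, pvG12, pvG13, true_and] <;> omega)

-- ===== VERDICT (by name: the statement is the Claim_ definition above) =====
set_option maxHeartbeats 2000000 in
theorem get_humancrytext_spec : Claim_equal_get_humancrytext := by
  intro t _
  show get_humancrytext t = get_humancrytext_alt t
  unfold get_humancrytext get_humancrytext_alt
  rw [pv_sorted_asc, pv_sorted_desc]
  by_cases hp : t > 0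
  · rw [if_pos hp, if_pos hp, pv_lb_false]
    simp only [pvScanGT]
    by_cases ha0 : t > 2992621
    · rw [if_pos ha0, if_neg (by omega : ¬ (t ≤ (-367397771 : Int))), if_neg (by omega : ¬ (t ≤ (-300000000 : Int))), if_neg (by omega : ¬ (t ≤ (-200000000 : Int))), if_neg (by omega : ¬ (t ≤ (-100000000 : Int))), if_neg (by omega : ¬ (t ≤ (-50000 : Int))), if_neg (by omega : ¬ (t ≤ 0)), if_neg (by omega : ¬ (t ≤ 1500000)), if_neg (by omega : ¬ (t ≤ 2000000)), if_neg (by omega : ¬ (t ≤ 2500000)), if_neg (by omega : ¬ (t ≤ 2700000)), if_neg (by omega : ¬ (t ≤ 2800000)), if_neg (by omega : ¬ (t ≤ 2890000)), if_neg (by omega : ¬ (t ≤ 2950000)), if_neg (by omega : ¬ (t ≤ 2992621))]; rfl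
    by_cases ha1 : t > 2950000
    · rw [if_neg ha0, if_pos ha1, if_neg (by omega : ¬ (t ≤ (-367397771 : Int))), if_neg (by omega : ¬ (t ≤ (-300000000 : Int))), if_neg (by omega : ¬ (t ≤ (-200000000 : Int))), if_neg (by omega : ¬ (t ≤ (-100000000 : Int))), if_neg (by omega : ¬ (t ≤ (-50000 : Int))), if_neg (by omega : ¬ (t ≤ 0)), if_neg (by omega : ¬ (t ≤ 1500000)), if_neg (by omega : ¬ (t ≤ 2000000)), if_neg (by omega : ¬ (t ≤ 2500000)), if_neg (by omega : ¬ (t ≤ 2700000)), if_neg (by omega : ¬ (t ≤ 2800000)), if_neg (by omega : ¬ (t ≤ 2890000)), if_neg (by omega : ¬ (t ≤ 2950000)), if_pos (by omega : t ≤ 2992621)]; rfl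
    by_cases ha2 : t > 2890000
    · rw [if_neg ha0, if_neg ha1, if_pos ha2, if_neg (by omega : ¬ (t ≤ (-367397771 : Int))), if_neg (by omega : ¬ (t ≤ (-300000000 : Int))), if_neg (by omega : ¬ (t ≤ (-200000000 : Int))), if_neg (by omega : ¬ (t ≤ (-100000000 : Int))), if_neg (by omega : ¬ (t ≤ (-50000 : Int))), if_neg (by omega : ¬ (t ≤ 0)), if_neg (by omega : ¬ (t ≤ 1500000)), if_neg (by omega : ¬ (t ≤ 2000000)), if_neg (by omega : ¬ (t ≤ 2500000)), if_neg (by omega : ¬ (t ≤ 2700000)), if_neg (by omega : ¬ (t ≤ 2800000)), if_neg (by omega : ¬ (t ≤ 2890000)), if_pos (by omega : t ≤ 2950000)]; rfl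
    by_cases ha3 : t > 2800000
    · rw [if_neg ha0, if_neg ha1, if_neg ha2, if_pos ha3, if_neg (by omega : ¬ (t ≤ (-367397771 : Int))), if_neg (by omega : ¬ (t ≤ (-300000000 : Int))), if_neg (by omega : ¬ (t ≤ (-200000000 : Int))), if_neg (by omega : ¬ (t ≤ (-100000000 : Int))), if_neg (by omega : ¬ (t ≤ (-50000 : Int))), if_neg (by omega : ¬ (t ≤ 0)), if_neg (by omega : ¬ (t ≤ 1500000)), if_neg (by omega : ¬ (t ≤ 2000000)), if_neg (by omega : ¬ (t ≤ 2500000)), if_neg (by omega : ¬ (t ≤ 2700000)), if_neg (by omega : ¬ (t ≤ 2800000)), if_pos (by omega : t ≤ 2890000)]; rfl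
    by_cases ha4 : t > 2700000
    · rw [if_neg ha0, if_neg ha1, if_neg ha2, if_neg ha3, if_pos ha4, if_neg (by omega : ¬ (t ≤ (-367397771 : Int))), if_neg (by omega : ¬ (t ≤ (-300000000 : Int))), if_neg (by omega : ¬ (t ≤ (-200000000 : Int))), if_neg (by omega : ¬ (t ≤ (-100000000 : Int))), if_neg (by omega : ¬ (t ≤ (-50000 : Int))), if_neg (by omega : ¬ (t ≤ 0)), if_neg (by omega : ¬ (t ≤ 1500000)), if_neg (by omega : ¬ (t ≤ 2000000)), if_neg (by omega : ¬ (t ≤ 2500000)), if_neg (by omega : ¬ (t ≤ 2700000)), if_pos (by omega : t ≤ 2800000)]; rfl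
    by_cases ha5 : t > 2500000
    · rw [if_neg ha0, if_neg ha1, if_neg ha2, if_neg ha3, if_neg ha4, if_pos ha5, if_neg (by omega : ¬ (t ≤ (-367397771 : Int))), if_neg (by omega : ¬ (t ≤ (-300000000 : Int))), if_neg (by omega : ¬ (t ≤ (-200000000 : Int))), if_neg (by omega : ¬ (t ≤ (-100000000 : Int))), if_neg (by omega : ¬ (t ≤ (-50000 : Int))), if_neg (by omega : ¬ (t ≤ 0)), if_neg (by omega : ¬ (t ≤ 1500000)), if_neg (by omega : ¬ (t ≤ 2000000)), if_neg (by omega : ¬ (t ≤ 2500000)), if_pos (by omega : t ≤ 2700000)]; rfl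
    by_cases ha6 : t > 2000000
    · rw [if_neg ha0, if_neg ha1, if_neg ha2, if_neg ha3, if_neg ha4, if_neg ha5, if_pos ha6, if_neg (by omega : ¬ (t ≤ (-367397771 : Int))), if_neg (by omega : ¬ (t ≤ (-300000000 : Int))), if_neg (by omega : ¬ (t ≤ (-200000000 : Int))), if_neg (by omega : ¬ (t ≤ (-100000000 : Int))), if_neg (by omega : ¬ (t ≤ (-50000 : Int))), if_neg (by omega : ¬ (t ≤ 0)), if_neg (by omega : ¬ (t ≤ 1500000)), if_neg (by omega : ¬ (t ≤ 2000000)), if_pos (by omega : t ≤ 2500000)]; rfl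
    by_cases ha7 : t > 1500000
    · rw [if_neg ha0, if_neg ha1, if_neg ha2, if_neg ha3, if_neg ha4, if_neg ha5, if_neg ha6, if_pos ha7, if_neg (by omega : ¬ (t ≤ (-367397771 : Int))), if_neg (by omega : ¬ (t ≤ (-300000000 : Int))), if_neg (by omega : ¬ (t ≤ (-200000000 : Int))), if_neg (by omega : ¬ (t ≤ (-100000000 : Int))), if_neg (by omega : ¬ (t ≤ (-50000 : Int))), if_neg (by omega : ¬ (t ≤ 0)), if_neg (by omega : ¬ (t ≤ 1500000)), if_pos (by omega : t ≤ 2000000)]; rfl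
    rw [if_neg ha0, if_neg ha1, if_neg ha2, if_neg ha3, if_neg ha4, if_neg ha5, if_neg ha6, if_neg ha7, if_pos hp, if_neg (by omega : ¬ (t ≤ (-367397771 : Int))), if_neg (by omega : ¬ (t ≤ (-300000000 : Int))), if_neg (by omega : ¬ (t ≤ (-200000000 : Int))), if_neg (by omega : ¬ (t ≤ (-100000000 : Int))), if_neg (by omega : ¬ (t ≤ (-50000 : Int))), if_neg (by omega : ¬ (t ≤ 0)), if_pos (by omega : t ≤ 1500000)]; rfl

  · rw [if_neg hp, if_neg hp, pv_lb_true]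
    simp only [pvScanLT]
    by_cases hb0 : t < (-367397771 : Int)
    · rw [if_pos hb0, if_pos hb0]; rfl
    by_cases hb1 : t < (-300000000 : Int)
    · rw [if_neg hb0, if_pos hb1, if_neg hb0, if_pos hb1]; rfl
    by_cases hb2 : t < (-200000000 : Int)
    · rw [if_neg hb0, if_neg hb1, if_pos hb2, if_neg hb0, if_neg hb1, if_pos hb2]; rfl
    by_cases hb3 : t < (-100000000 : Int)
    · rw [if_neg hb0, if_neg hb1, if_neg hb2, if_pos hb3, if_neg hb0, if_neg hb1, if_neg hb2, if_pos hb3]; rfl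
    by_cases hb4 : t < (-50000 : Int)
    · rw [if_neg hb0, if_neg hb1, if_neg hb2, if_neg hb3, if_pos hb4, if_neg hb0, if_neg hb1, if_neg hb2, if_neg hb3, if_pos hb4]; rfl
    by_cases hb5 : t < 0
    · rw [if_neg hb0, if_neg hb1, if_neg hb2, if_neg hb3, if_neg hb4, if_pos hb5, if_neg hb0, if_neg hb1, if_neg hb2, if_neg hb3, if_neg hb4, if_pos hb5]; rfl
    rw [if_neg hb0, if_neg hb1, if_neg hb2, if_neg hb3, if_neg hb4, if_neg hb5, if_pos (by omega : t < 1500000), if_neg hb0, if_neg hb1, if_neg hb2, if_neg hb3, if_neg hb4, if_neg hb5, if_pos (by omega : t < 1500000)]; rfl
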